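-- pv_equiv track=rewrite | github.com/lisn0/projet_system | ordononceur.py | get_sj
-- ===== SOURCE A (Python) =====
-- def selectionSort(alist, s):
--     for i in range(len(alist)):
--         minPosition = i
--         for j in range(i + 1, len(alist)):
--             if alist[minPosition][s] > alist[j][s]:
--                 minPosition = j
--         temp = alist[i]
--         alist[i] = alist[minPosition]
--         alist[minPosition] = temp
--     return alist
--
-- def get_sj(alist, index):
--     temp = [alist[0], ]
--     for i in alist[1:]:
--         if i[1] <= index:
--             temp.append(i)
--         else:
--             break
--     return selectionSort(temp, 2)[0]
-- ===== SOURCE B (Python) =====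
-- def get_sj(alist, index):
--     best = alist[0]
--     for i in alist[1:]:
--         if i[1] > index:
--             break
--         if i[2] < best[2]:
--             best = i
--     return best
-- ===== Notes on version B (the rewrite author's own statement) =====
-- stated objective: simpler
-- what changed: B drops A's two-phase structure (materialise the filtered prefix as a list, selection-sort it by column 2, take element 0) and instead keeps a single running minimum while scanning, breaking at the first row with row[1] > index.
import Mathlib
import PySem

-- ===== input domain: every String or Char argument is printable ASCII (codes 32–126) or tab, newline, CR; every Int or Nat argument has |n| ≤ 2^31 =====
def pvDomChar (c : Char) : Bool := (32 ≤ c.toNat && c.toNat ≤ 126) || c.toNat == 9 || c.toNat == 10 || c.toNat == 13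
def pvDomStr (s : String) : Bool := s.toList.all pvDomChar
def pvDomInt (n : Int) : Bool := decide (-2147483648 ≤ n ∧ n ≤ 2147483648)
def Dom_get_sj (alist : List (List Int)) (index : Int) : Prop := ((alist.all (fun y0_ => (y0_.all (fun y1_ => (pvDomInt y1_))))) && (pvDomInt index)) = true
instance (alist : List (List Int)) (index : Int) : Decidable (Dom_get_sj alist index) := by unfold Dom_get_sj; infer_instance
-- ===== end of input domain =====

-- B replaces A's "build the filtered prefix, selection-sort it by column 2, take the first
-- element" with a single running-minimum pass over the list that breaks early (objective: simpler).

-- ===== PORT A =====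
-- literal port of selectionSort(alist, s): in-place index loops become folds over pyRange,
-- list indexing/assignment via PySem.List.pyGet?/pySetD (indices produced by range are in
-- range and nonnegative, so the .getD defaults are never exercised on admitted inputs)
def selectionSort (alist : List (List Int)) (s : Int) : List (List Int) :=
  (PySem.List.pyRange 0 (alist.length : Int) 1).foldl (fun a i =>
    let minPosition :=
      (PySem.List.pyRange (i + 1) (a.length : Int) 1).foldl (fun mp j =>
        if (PySem.List.pyGet? ((PySem.List.pyGet? a mp).getD []) s).getD 0 >
           (PySem.List.pyGet? ((PySem.List.pyGet? a j).getD []) s).getD 0 then j else mp) i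
    let temp := (PySem.List.pyGet? a i).getD []
    let a' := PySem.List.pySetD a i ((PySem.List.pyGet? a minPosition).getD [])
    PySem.List.pySetD a' minPosition temp) alist

-- the 'for i in alist[1:]: if i[1] <= index: temp.append(i) else: break' loop of A
def get_sjTemp (index : Int) : List (List Int) → List (List Int)
  | [] => []
  | i :: rest =>
      if ((PySem.List.pyGet? i 1).getD 0) ≤ index then i :: get_sjTemp index rest else []

def get_sj (alist : List (List Int)) (index : Int) : List Int :=
  let temp := ((PySem.List.pyGet? alist 0).getD []) ::
      get_sjTemp index (PySem.List.slice alist (some 1) none)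
  (PySem.List.pyGet? (selectionSort temp 2) 0).getD []

-- ===== PORT B =====
-- B's loop: keep a running best, break as soon as i[1] > index
def get_sjScan (index : Int) (best : List Int) : List (List Int) → List Int
  | [] => best
  | i :: rest =>
      if ((PySem.List.pyGet? i 1).getD 0) > index then best
      else get_sjScan index
        (if ((PySem.List.pyGet? i 2).getD 0) < ((PySem.List.pyGet? best 2).getD 0) then i else best)
        rest

def get_sj_alt (alist : List (List Int)) (index : Int) : List Int :=
  get_sjScan index ((PySem.List.pyGet? alist 0).getD []) (PySem.List.slice alist (some 1) none)

-- ===== PRECONDITION & SPEC =====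
def pvOk (index : Int) (x : List Int) : Bool := 3 ≤ x.length && x.getD 1 0 ≤ index

-- Pre_ = exactly the inputs on which the Python A returns (no IndexError): the list is nonempty
-- and, along alist[1:], either every row is kept (length ≥ 3, row[1] ≤ index) up to the end, or
-- up to a first breaking row (length ≥ 2 with row[1] > index); the head row needs length ≥ 3
-- only when some row is actually kept (otherwise the sort never indexes it).
def Pre_get_sj (alist : List (List Int)) (index : Int) : Prop :=
  alist ≠ [] ∧
  (((∀ x ∈ alist.tail, pvOk index x = true) ∧
      (alist.tail = [] ∨ 3 ≤ (alist.headD []).length)) ∨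
    (∃ k < alist.tail.length,
      (∀ j < k, pvOk index (alist.tail.getD j []) = true) ∧
      2 ≤ (alist.tail.getD k []).length ∧
      index < (alist.tail.getD k []).getD 1 0 ∧
      (k = 0 ∨ 3 ≤ (alist.headD []).length)))
instance (alist : List (List Int)) (index : Int) : Decidable (Pre_get_sj alist index) := by
  unfold Pre_get_sj; infer_instance

def pvWitness_get_sj : List (List Int) × Int := ([[1, 0, 5], [2, 0, 3], [3, 9, 9]], 0)

def Spec_get_sj (alist : List (List Int)) (index : Int) (out : List Int) : Prop := out = get_sj_alt alist index
instance (alist : List (List Int)) (index : Int) (out : List Int) : Decidable (Spec_get_sj alist index out) := by unfold Spec_get_sj; infer_instance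

-- ===== CLAIM (what is proved, stated in full; the proofs are below) =====
def Claim_equal_get_sj : Prop := ∀ (alist : List (List Int)) (index : Int), Dom_get_sj alist index → Pre_get_sj alist index → Spec_get_sj alist index (get_sj alist index)

-- ===== LEMMAS AND PROOFS =====

-- proof-side abbreviations: element read, sort key, running minimum
def pvE (a : List (List Int)) (p : Int) : List Int := (PySem.List.pyGet? a p).getD []
def pvKey (s : Int) (row : List Int) : Int := (PySem.List.pyGet? row s).getD 0
def pvFMin (s : Int) (best : List Int) (l : List (List Int)) : List Int :=
  l.foldl (fun b x => if pvKey s x < pvKey s b then x else b) best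

-- B's scan is the running minimum over the prefix A materialises
theorem pv_scan_eq_fmin (index : Int) (l : List (List Int)) (best : List Int) :
    get_sjScan index best l = pvFMin 2 best (get_sjTemp index l) := by
  induction l generalizing best with
  | nil => simp [get_sjScan, get_sjTemp, pvFMin]
  | cons i rest ih =>
      by_cases h : ((PySem.List.pyGet? i 1).getD 0) ≤ index
      · have h' : ¬ ((PySem.List.pyGet? i 1).getD 0) > index := not_lt.mpr h
        rw [get_sjScan, if_neg h', get_sjTemp, if_pos h, ih]
        simp only [pvFMin, pvKey, List.foldl_cons]
        rfl
      · have h' : ((PySem.List.pyGet? i 1).getD 0) > index := lt_of_not_ge h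
        rw [get_sjScan, if_pos h', get_sjTemp, if_neg h]
        rfl

-- the inner minPosition fold, read through the list, is the running minimum of the read rows
theorem pv_inner_fmin (a : List (List Int)) (s : Int) (js : List Int) (mp : Int) :
    pvE a (js.foldl (fun mp j =>
        if (PySem.List.pyGet? ((PySem.List.pyGet? a mp).getD []) s).getD 0 >
           (PySem.List.pyGet? ((PySem.List.pyGet? a j).getD []) s).getD 0 then j else mp) mp)
      = pvFMin s (pvE a mp) (js.map (pvE a)) := by
  induction js generalizing mp with
  | nil => simp [pvFMin]
  | cons j rest ih =>
      simp only [List.foldl_cons, List.map_cons]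
      refine (ih _).trans ?_
      have hstep : pvE a (if (PySem.List.pyGet? ((PySem.List.pyGet? a mp).getD []) s).getD 0 >
           (PySem.List.pyGet? ((PySem.List.pyGet? a j).getD []) s).getD 0 then j else mp)
          = if pvKey s (pvE a j) < pvKey s (pvE a mp) then pvE a j else pvE a mp := by
        simp only [pvKey, pvE, gt_iff_lt]
        split <;> rfl
      rw [hstep]
      simp only [pvFMin, List.foldl_cons]

-- the inner fold returns its start index or one of the scanned indices
theorem pv_inner_mem (f : Int → Int → Int) (hf : ∀ mp j, f mp j = j ∨ f mp j = mp)
    (js : List Int) (mp : Int) : js.foldl f mp ∈ mp :: js := by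
  induction js generalizing mp with
  | nil => simp
  | cons j rest ih =>
      simp only [List.foldl_cons]
      rcases hf mp j with h1 | h1 <;> rw [h1]
      · rcases List.mem_cons.mp (ih j) with h2 | h2
        · exact List.mem_cons.mpr (Or.inr (List.mem_cons.mpr (Or.inl h2)))
        · exact List.mem_cons.mpr (Or.inr (List.mem_cons.mpr (Or.inr h2)))
      · rcases List.mem_cons.mp (ih mp) with h2 | h2
        · exact List.mem_cons.mpr (Or.inl h2)
        · exact List.mem_cons.mpr (Or.inr (List.mem_cons.mpr (Or.inr h2)))

-- reading positions 1..len-1 through the list gives the tail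
theorem pv_map_pvE_range (a : List (List Int)) :
    (PySem.List.pyRange 1 (a.length : Int) 1).map (pvE a) = a.tail := by
  cases a with
  | nil => simp [PySem.List.pyRange_one_eq_nil]
  | cons h t =>
      apply List.ext_getElem
      · simp [PySem.List.length_pyRange_one]
      · intro k hk hk'
        simp only [List.getElem_map, PySem.List.getElem_pyRange_one, pvE]
        have hcast : (1 : Int) + k = ((k + 1 : Nat) : Int) := by push_cast; ring
        rw [hcast, PySem.List.pyGet?_natCast]
        have hk2 : k < t.length := by simpa using hk'
        simp [hk2]

-- a double pySetD at positions ≥ 1 does not move the element at position 0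
theorem pv_setset (a : List (List Int)) (i mp : Int) (v w : List Int)
    (hi : 1 ≤ i) (hmp : 1 ≤ mp) :
    (PySem.List.pySetD (PySem.List.pySetD a i v) mp w)[0]? = a[0]? := by
  rw [PySem.List.pySetD_of_nonneg _ _ (show (0:Int) ≤ mp by omega),
      PySem.List.pySetD_of_nonneg _ _ (show (0:Int) ≤ i by omega)]
  rw [List.getElem?_set_ne (show mp.toNat ≠ 0 by omega), List.getElem?_set_ne (show i.toNat ≠ 0 by omega)]

-- a fold whose every step keeps position 0 fixed keeps position 0 fixed
theorem pv_foldl_pres (f : List (List Int) → Int → List (List Int))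
    (hstep : ∀ b i, 1 ≤ i → (f b i)[0]? = b[0]?) (is_ : List Int)
    (hall : ∀ i ∈ is_, 1 ≤ i) (b : List (List Int)) :
    (is_.foldl f b)[0]? = b[0]? := by
  induction is_ generalizing b with
  | nil => rfl
  | cons i rest ih =>
      rw [List.foldl_cons, ih (fun x hx => hall x (List.mem_cons_of_mem _ hx))]
      exact hstep b i (hall i List.mem_cons_self)

-- head of the selection sort of a nonempty list = running minimum of the head over the tail
theorem pv_selSort_head (s : Int) (h : List Int) (t : List (List Int)) :
    (PySem.List.pyGet? (selectionSort (h :: t) s) 0).getD [] = pvFMin s h t := by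
  have hlen : (0 : Int) < (((h :: t).length : Nat) : Int) := by
    have : 0 < (h :: t).length := Nat.succ_pos _
    exact_mod_cast this
  unfold selectionSort
  rw [PySem.List.pyRange_one_cons hlen, List.foldl_cons, PySem.List.pyGet?_zero]
  have hf : ∀ (aa : List (List Int)) (mp j : Int),
      (if (PySem.List.pyGet? ((PySem.List.pyGet? aa mp).getD []) s).getD 0 >
          (PySem.List.pyGet? ((PySem.List.pyGet? aa j).getD []) s).getD 0 then j else mp) = j ∨
      (if (PySem.List.pyGet? ((PySem.List.pyGet? aa mp).getD []) s).getD 0 >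
          (PySem.List.pyGet? ((PySem.List.pyGet? aa j).getD []) s).getD 0 then j else mp) = mp := by
    intro aa mp j; split
    · exact Or.inl rfl
    · exact Or.inr rfl
  -- all remaining outer indices are ≥ 1 and leave position 0 alone
  rw [pv_foldl_pres _ ?hstep _ ?hall]
  case hstep =>
    intro b i hi
    show (PySem.List.pySetD _ _ _)[0]? = b[0]?
    have hmem := pv_inner_mem _ (hf b)
      (PySem.List.pyRange (i + 1) ((b.length : Nat) : Int) 1) i
    have hmp1 : 1 ≤ (PySem.List.pyRange (i + 1) ((b.length : Nat) : Int) 1).foldl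
        (fun mp j => if (PySem.List.pyGet? ((PySem.List.pyGet? b mp).getD []) s).getD 0 >
            (PySem.List.pyGet? ((PySem.List.pyGet? b j).getD []) s).getD 0 then j else mp) i := by
      rcases List.mem_cons.mp hmem with h2 | h2
      · omega
      · have := PySem.List.mem_pyRange_one.mp h2; omega
    exact pv_setset b i _ _ _ hi hmp1
  case hall =>
    intro i hi
    have := PySem.List.mem_pyRange_one.mp hi; omega
  -- the first outer step (i = 0) puts the running minimum at position 0
  show ((PySem.List.pySetD _ _ _)[0]?).getD [] = pvFMin s h t
  have h01 : (0 : Int) + 1 = 1 := by norm_num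
  have hMval := pv_inner_fmin (h :: t) s
    (PySem.List.pyRange (0 + 1) (((h :: t).length : Nat) : Int) 1) 0
  rw [h01, pv_map_pvE_range] at hMval
  have hE0 : pvE (h :: t) 0 = h := by
    simp [pvE]
  rw [hE0] at hMval
  have hmem := pv_inner_mem _ (hf (h :: t))
    (PySem.List.pyRange (0 + 1) (((h :: t).length : Nat) : Int) 1) 0
  set M0 := (PySem.List.pyRange (0 + 1) (((h :: t).length : Nat) : Int) 1).foldl
      (fun mp j => if (PySem.List.pyGet? ((PySem.List.pyGet? (h :: t) mp).getD []) s).getD 0 >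
          (PySem.List.pyGet? ((PySem.List.pyGet? (h :: t) j).getD []) s).getD 0 then j else mp) 0
    with hM0
  have hM0val : (PySem.List.pyGet? (h :: t) M0).getD [] = pvFMin s h t := by
    rw [h01] at hM0
    exact hM0 ▸ hMval
  have hM0nn : 0 ≤ M0 := by
    rcases List.mem_cons.mp hmem with h2 | h2
    · omega
    · have := PySem.List.mem_pyRange_one.mp h2; omega
  by_cases hz : M0 = 0
  · rw [hz] at hM0val ⊢
    rw [PySem.List.pySetD_of_nonneg _ _ (by norm_num), PySem.List.pySetD_of_nonneg _ _ (by norm_num)]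
    simp only [Int.toNat_zero]
    rw [List.getElem?_set_self]
    · rw [PySem.List.pyGet?_zero_cons] at hM0val ⊢
      simp [hM0val]
    · simp
  · have hM1 : 1 ≤ M0 := by omega
    rw [PySem.List.pySetD_of_nonneg _ _ hM0nn, List.getElem?_set_ne (show M0.toNat ≠ (0:Nat) by omega)]
    rw [PySem.List.pySetD_of_nonneg _ _ (by norm_num)]
    simp only [Int.toNat_zero]
    rw [List.getElem?_set_self (by simp)]
    simp [hM0val]

theorem pv_main (alist : List (List Int)) (index : Int) :
    get_sj alist index = get_sj_alt alist index := by
  unfold get_sj get_sj_alt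
  rw [pv_selSort_head, pv_scan_eq_fmin]

-- ===== VERDICT (by name: the statement is the Claim_ definition above) =====
theorem get_sj_spec : Claim_equal_get_sj := by
  intro alist index _ _
  unfold Spec_get_sj
  exact pv_main alist index
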